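-- pv_equiv track=rewrite | github.com/nitekat1124/advent-of-code-2015 | solutions/day24.py | parse
-- ===== SOURCE A (Python) =====
-- def parse(data, n):
--     packages = [*map(int, data)]
--     target_weight = sum(packages) // n
--
--     max_pack_size = len(packages)
--     for i in range(1, len(packages)):
--         if sum(packages[:i]) < target_weight:
--             continue
--         else:
--             max_pack_size = i
--             break
--     return packages, target_weight, max_pack_size
-- ===== SOURCE B (Python) =====
-- def parse(data, n):
--     packages = list(map(int, data))
--     target_weight = sum(packages) // n
--     max_pack_size = len(packages)
--     acc = 0
--     for i, p in enumerate(packages[:-1], start=1):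
--         acc += p
--         if acc >= target_weight:
--             max_pack_size = i
--             break
--     return packages, target_weight, max_pack_size
-- ===== Notes on version B (the rewrite author's own statement) =====
-- stated objective: faster
-- what changed: replaces the per-iteration re-summation of the prefix slice sum(packages[:i]) with a single running prefix sum maintained across one pass
import Mathlib
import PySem

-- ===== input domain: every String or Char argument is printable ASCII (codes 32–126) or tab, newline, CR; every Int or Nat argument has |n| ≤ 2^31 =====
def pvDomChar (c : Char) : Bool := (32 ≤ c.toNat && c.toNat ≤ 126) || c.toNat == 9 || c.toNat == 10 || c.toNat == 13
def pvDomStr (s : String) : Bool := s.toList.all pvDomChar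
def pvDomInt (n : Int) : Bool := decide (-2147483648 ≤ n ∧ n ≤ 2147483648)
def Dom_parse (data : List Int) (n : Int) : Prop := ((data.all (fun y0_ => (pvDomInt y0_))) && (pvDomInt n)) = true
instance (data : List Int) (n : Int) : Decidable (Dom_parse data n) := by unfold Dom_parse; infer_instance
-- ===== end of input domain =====

-- B replaces A's quadratic re-summation of each prefix slice by one running prefix sum (objective: faster).

-- ===== PORT A =====
-- the 'for i in range(1, len(packages))' loop with the 'continue/break' structure;
-- returns the loop variable at the break, or the default when the range is exhausted
def parseLoopA (packages : List Int) (tw : Int) : List Int → Int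
  | [] => (packages.length : Int)
  | i :: rest =>
    if (PySem.List.slice packages none (some i)).sum < tw then
      parseLoopA packages tw rest
    else i

def parse (data : List Int) (n : Int) : List Int × Int × Int :=
  let packages := data
  let target_weight := PySem.Int.floordiv packages.sum n
  let max_pack_size := parseLoopA packages target_weight (PySem.List.pyRange 1 (packages.length : Int) 1)
  (packages, target_weight, max_pack_size)

-- ===== PORT B =====
-- Source B's loop: 'for i, p in enumerate(packages[:-1], start=1): acc += p; if acc >= target_weight: break'
def parseLoopB (tw dflt : Int) : Int → List (Int × Int) → Int
  | _, [] => dflt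
  | acc, (i, p) :: rest =>
    let acc' := acc + p
    if tw ≤ acc' then i else parseLoopB tw dflt acc' rest

def parse_alt (data : List Int) (n : Int) : List Int × Int × Int :=
  let packages := data
  let target_weight := PySem.Int.floordiv packages.sum n
  let max_pack_size := parseLoopB target_weight (packages.length : Int) 0
      (PySem.List.enumerate (PySem.List.slice packages none (some (-1))) 1)
  (packages, target_weight, max_pack_size)

-- ===== PRECONDITION & SPEC =====
-- Pre_ excludes only n = 0, where Python A raises ZeroDivisionError on 'sum(packages) // n'.
def Pre_parse (data : List Int) (n : Int) : Prop := n ≠ 0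
instance (data : List Int) (n : Int) : Decidable (Pre_parse data n) := by unfold Pre_parse; infer_instance
def pvWitness_parse : List Int × Int := ([1, 2, 3], 2)

def Spec_parse (data : List Int) (n : Int) (out : List Int × Int × Int) : Prop := out = parse_alt data n
instance (data : List Int) (n : Int) (out : List Int × Int × Int) : Decidable (Spec_parse data n out) := by unfold Spec_parse; infer_instance

-- ===== CLAIM (what is proved, stated in full; the proofs are below) =====
def Claim_equal_parse : Prop := ∀ (data : List Int) (n : Int), Dom_parse data n → Pre_parse data n → Spec_parse data n (parse data n)

-- ===== LEMMAS AND PROOFS =====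

-- A's loop over range(k+1, len) equals B's loop over the enumerated remaining prefix-elements,
-- provided B's accumulator equals the sum of the first k packages.
theorem loopA_eq_loopB (packages : List Int) (tw : Int) (k : Nat) :
    parseLoopA packages tw (PySem.List.pyRange ((k : Int) + 1) (packages.length : Int) 1)
      = parseLoopB tw (packages.length : Int) (packages.take k).sum
          (PySem.List.enumerate ((packages.take (packages.length - 1)).drop k) ((k : Int) + 1)) := by
  by_cases hk : k < packages.length - 1
  · have hkl : k < packages.length := by omega
    have hdrop : (packages.take (packages.length - 1)).drop k
        = packages[k] :: (packages.take (packages.length - 1)).drop (k + 1) := by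
      have hlen : k < (packages.take (packages.length - 1)).length := by
        simp [List.length_take]; omega
      rw [List.drop_eq_getElem_cons hlen, List.getElem_take]
    have hlt : (k : Int) + 1 < (packages.length : Int) := by exact_mod_cast (by omega : (k:Int) + 1 < (packages.length : Int))
    rw [PySem.List.pyRange_one_cons hlt, hdrop, PySem.List.enumerate_cons]
    show (if (PySem.List.slice packages none (some ((k:Int)+1))).sum < tw then _ else _) = _
    have hslice : (PySem.List.slice packages none (some ((k : Int) + 1))).sum
        = (packages.take (k + 1)).sum := by
      rw [PySem.List.slice_to packages (by omega : (0:Int) ≤ ((k:Int)+1))]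
      norm_num
    have hacc : (packages.take k).sum + packages[k] = (packages.take (k + 1)).sum := by
      rw [List.take_add_one]
      simp [hkl]
    rw [hslice]
    simp only [parseLoopB, hacc]
    split_ifs with h1 h2
    · omega
    · have := loopA_eq_loopB packages tw (k + 1)
      push_cast at this ⊢
      rw [this]
    · rfl
    · omega
  · have h1 : PySem.List.pyRange ((k : Int) + 1) (packages.length : Int) 1 = [] := by
      apply PySem.List.pyRange_one_eq_nil
      omega
    have h2 : (packages.take (packages.length - 1)).drop k = [] := by
      apply List.drop_eq_nil_of_le
      simp [List.length_take]; omega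
    rw [h1, h2]
    simp [parseLoopA, parseLoopB, PySem.List.enumerate]

-- ===== VERDICT (by name: the statement is the Claim_ definition above) =====
theorem parse_spec : Claim_equal_parse := by
  intro data n _ _
  unfold Spec_parse parse parse_alt
  have h := loopA_eq_loopB data (PySem.Int.floordiv data.sum n) 0
  simp only [Nat.cast_zero, zero_add, List.take_zero, List.sum_nil, List.drop_zero] at h
  have hs : PySem.List.slice data none (some (-1)) = data.take (data.length - 1) := by
    simp [pysem, List.dropLast_eq_take]
  simp only [hs, h]
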